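-- pv_equiv track=rewrite | github.com/cryptob1/oflow | oflow.py | _clean_punctuation_spacing
-- ===== SOURCE A (Python) =====
-- def _clean_punctuation_spacing(text: str) -> str:
--     """Clean up spacing around punctuation marks."""
--     result = text
--
--     # Remove space before punctuation
--     for punct in ['.', ',', '?', '!', ':', ';', ')', ']', '}']:
--         result = result.replace(f" {punct}", punct)
--
--     # Remove space after opening brackets
--     for punct in ['(', '[', '{']:
--         result = result.replace(f"{punct} ", punct)
--
--     # Clean newlines/tabs
--     result = result.replace(" \n", "\n").replace("\n ", "\n")
--     result = result.replace(" \t", "\t").replace("\t ", "\t")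
--
--     return result
-- ===== SOURCE B (Python) =====
-- def _clean_punctuation_spacing(text: str) -> str:
--     """Clean up spacing around punctuation marks (single scan over the original text)."""
--     open_before = {'(', '[', '{', '\n', '\t'}
--     close_after = {'.', ',', '?', '!', ':', ';', ')', ']', '}', '\n', '\t'}
--     out = []
--     prev = None
--     for i, ch in enumerate(text):
--         nxt = text[i + 1] if i + 1 < len(text) else None
--         if not (ch == ' ' and (prev in open_before or nxt in close_after)):
--             out.append(ch)
--         prev = ch
--     return ''.join(out)
-- ===== Notes on version B (the rewrite author's own statement) =====
-- stated objective: alternative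
-- what changed: Replaces A's 13 sequential global str.replace passes by a single left-to-right scan over the original text that drops each space whose original neighbor is a trigger character (punctuation/newline/tab after it, opening bracket/newline/tab before it).
import Mathlib
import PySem

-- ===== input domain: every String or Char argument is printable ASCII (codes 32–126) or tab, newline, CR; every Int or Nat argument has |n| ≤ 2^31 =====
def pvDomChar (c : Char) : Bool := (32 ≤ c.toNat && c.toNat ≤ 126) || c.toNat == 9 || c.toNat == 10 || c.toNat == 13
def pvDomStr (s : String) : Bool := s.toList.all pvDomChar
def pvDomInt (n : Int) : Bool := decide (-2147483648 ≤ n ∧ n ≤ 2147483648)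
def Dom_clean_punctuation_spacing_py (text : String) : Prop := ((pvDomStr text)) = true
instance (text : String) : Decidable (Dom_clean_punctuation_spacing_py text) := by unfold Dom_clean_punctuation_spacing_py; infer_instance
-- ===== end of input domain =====

-- B replaces A's 16 sequential global replace passes by ONE left-to-right scan that decides each
-- space from its original neighbors (objective: alternative single-pass decomposition; not claimed faster).


-- ===== PORT A =====
def clean_punctuation_spacing_py (text : String) : String :=
  let result := text
  -- Remove space before punctuation
  let result := ['.', ',', '?', '!', ':', ';', ')', ']', '}'].foldl
    (fun r punct => PySem.Str.replace r (String.ofList [' ', punct]) (String.ofList [punct])) result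
  -- Remove space after opening brackets
  let result := ['(', '[', '{'].foldl
    (fun r punct => PySem.Str.replace r (String.ofList [punct, ' ']) (String.ofList [punct])) result
  -- Clean newlines/tabs
  let result := PySem.Str.replace (PySem.Str.replace result (String.ofList [' ', '\n']) (String.ofList ['\n'])) (String.ofList ['\n', ' ']) (String.ofList ['\n'])
  let result := PySem.Str.replace (PySem.Str.replace result (String.ofList [' ', '\t']) (String.ofList ['\t'])) (String.ofList ['\t', ' ']) (String.ofList ['\t'])
  result

-- ===== PORT B =====
-- the 'prev in open_before' / 'nxt in close_after' test of Source B (None ↦ none)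
def pvMemo (o : Option Char) (S : List Char) : Bool :=
  match o with
  | none => false
  | some x => S.contains x

-- the single pass of Source B: prev = original previous char, rest.head? = the one-char lookahead
def pvScan (P N : List Char) : Option Char → List Char → List Char
  | _, [] => []
  | prev, ch :: rest =>
    if ch = ' ' ∧ (pvMemo prev P || pvMemo rest.head? N) = true then
      pvScan P N (some ' ') rest
    else
      ch :: pvScan P N (some ch) rest

def clean_punctuation_spacing_py_alt (text : String) : String :=
  String.ofList (pvScan ['(', '[', '{', '\n', '\t']
                        ['.', ',', '?', '!', ':', ';', ')', ']', '}', '\n', '\t']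
                        none text.toList)

-- ===== PRECONDITION & SPEC =====
def Spec_clean_punctuation_spacing_py (text : String) (out : String) : Prop := out = clean_punctuation_spacing_py_alt text
instance (text : String) (out : String) : Decidable (Spec_clean_punctuation_spacing_py text out) := by unfold Spec_clean_punctuation_spacing_py; infer_instance

-- ===== CLAIM (what is proved, stated in full; the proofs are below) =====
def Claim_equal_clean_punctuation_spacing_py : Prop := ∀ (text : String), Dom_clean_punctuation_spacing_py text → Spec_clean_punctuation_spacing_py text (clean_punctuation_spacing_py text)

-- ===== LEMMAS AND PROOFS =====

lemma pvMemo_nil (p : Option Char) : pvMemo p [] = false := by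
  cases p <;> rfl

lemma pvMemo_some (x : Char) (S : List Char) : pvMemo (some x) S = S.contains x := rfl

lemma pvMemo_append (p : Option Char) (S T : List Char) :
    pvMemo p (S ++ T) = (pvMemo p S || pvMemo p T) := by
  cases p <;> simp [pvMemo]

lemma pvScan_next_indep (N : List Char) (l : List Char) :
    ∀ (p q : Option Char), pvScan [] N p l = pvScan [] N q l := by
  induction l with
  | nil => intro p q; rfl
  | cons ch rest ih => intro p q; simp only [pvScan, pvMemo_nil]

lemma replace_next_go (c : Char) (hc : c ≠ ' ') :
    ∀ (fuel : Nat) (l acc : List Char), l.length ≤ fuel →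
      PySem.Chars.replace.go [' ', c] [c] fuel l acc = acc.reverse ++ pvScan [] [c] none l := by
  intro fuel
  induction fuel with
  | zero =>
    intro l acc hl
    have : l = [] := List.length_eq_zero_iff.mp (Nat.le_zero.mp hl)
    subst this
    simp [PySem.Chars.replace.go, pvScan]
  | succ fuel ih =>
    intro l acc hl
    cases l with
    | nil => simp [PySem.Chars.replace.go, pvScan]
    | cons ch t =>
      by_cases hpre : [' ', c].isPrefixOf (ch :: t) = true
      · obtain ⟨hch, hc2⟩ : ' ' = ch ∧ [c] <+: t := by
          simpa [List.isPrefixOf] using hpre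
        cases t with
        | nil => simp at hc2
        | cons c' t' =>
          obtain ⟨rfl⟩ : c = c' := by simpa [List.isPrefixOf] using hc2
          subst hch
          have hstep : PySem.Chars.replace.go [' ', c] [c] (fuel+1) (' ' :: c :: t') acc
              = PySem.Chars.replace.go [' ', c] [c] fuel t' (c :: acc) := by
            simp [PySem.Chars.replace.go, hpre]
          rw [hstep, ih t' (c :: acc) (by simp at hl ⊢; omega)]
          have h1 : pvScan [] [c] none (' ' :: c :: t') = c :: pvScan [] [c] none t' := by
            simp [pvScan, pvMemo_nil, pvMemo_some, hc, pvScan_next_indep [c] t' (some c) none]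
          rw [h1]
          simp
      · have hstep : PySem.Chars.replace.go [' ', c] [c] (fuel+1) (ch :: t) acc
            = PySem.Chars.replace.go [' ', c] [c] fuel t (ch :: acc) := by
          simp [PySem.Chars.replace.go, hpre]
        rw [hstep, ih t (ch :: acc) (by simp at hl ⊢; omega)]
        have hcond : ¬ (ch = ' ' ∧ (pvMemo none [] || pvMemo t.head? [c]) = true) := by
          rintro ⟨rfl, hmem⟩
          apply hpre
          simp [pvMemo] at hmem
          cases ht : t.head? with
          | none => simp [ht] at hmem
          | some x =>
            simp [ht] at hmem
            cases t with
            | nil => simp at ht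
            | cons y t' =>
              simp at ht
              subst ht
              simp [List.isPrefixOf, hmem]
        have h2 : pvScan [] [c] none (ch :: t) = ch :: pvScan [] [c] none t := by
          simp only [pvScan]
          rw [if_neg hcond]
          rw [pvScan_next_indep [c] t (some ch) none]
        rw [h2]
        simp

lemma replace_next (c : Char) (hc : c ≠ ' ') (s : List Char) :
    PySem.Chars.replace s [' ', c] [c] = pvScan [] [c] none s := by
  have h := replace_next_go c hc s.length s [] (le_refl _)
  simpa [PySem.Chars.replace] using h

lemma replace_prev_go (c : Char) (hc : c ≠ ' ') :
    ∀ (fuel : Nat) (l acc : List Char) (p : Option Char), l.length ≤ fuel →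
      (pvMemo p [c] = false ∨ l.head? ≠ some ' ') →
      PySem.Chars.replace.go [c, ' '] [c] fuel l acc = acc.reverse ++ pvScan [c] [] p l := by
  intro fuel
  induction fuel with
  | zero =>
    intro l acc p hl _
    have : l = [] := List.length_eq_zero_iff.mp (Nat.le_zero.mp hl)
    subst this
    simp [PySem.Chars.replace.go, pvScan]
  | succ fuel ih =>
    intro l acc p hl hinv
    cases l with
    | nil => simp [PySem.Chars.replace.go, pvScan]
    | cons ch t =>
      by_cases hpre : [c, ' '].isPrefixOf (ch :: t) = true
      · obtain ⟨hch, hc2⟩ : c = ch ∧ [' '] <+: t := by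
          simpa [List.isPrefixOf] using hpre
        cases t with
        | nil => simp at hc2
        | cons c' t' =>
          obtain ⟨rfl⟩ : ' ' = c' := by simpa using hc2
          subst hch
          have hstep : PySem.Chars.replace.go [c, ' '] [c] (fuel+1) (c :: ' ' :: t') acc
              = PySem.Chars.replace.go [c, ' '] [c] fuel t' (c :: acc) := by
            simp [PySem.Chars.replace.go, hpre]
          rw [hstep, ih t' (c :: acc) (some ' ')
            (by simp at hl ⊢; omega)
            (Or.inl (by simp [pvMemo_some]; exact fun h => hc h.symm))]
          have h1 : pvScan [c] [] p (c :: ' ' :: t') = c :: pvScan [c] [] (some ' ') t' := by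
            simp only [pvScan]
            rw [if_neg (by simp [hc]), if_pos (by simp [pvMemo_some])]
          rw [h1]; simp
      · have hstep : PySem.Chars.replace.go [c, ' '] [c] (fuel+1) (ch :: t) acc
            = PySem.Chars.replace.go [c, ' '] [c] fuel t (ch :: acc) := by
          simp [PySem.Chars.replace.go, hpre]
        rw [hstep]
        by_cases hsp : ch = ' '
        · subst hsp
          have hpm : pvMemo p [c] = false := by
            rcases hinv with h | h
            · exact h
            · exact absurd rfl h
          have h2 : pvScan [c] [] p (' ' :: t) = ' ' :: pvScan [c] [] (some ' ') t := by
            simp only [pvScan]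
            rw [if_neg (by simp [hpm, pvMemo_nil])]
          rw [h2, ih t (' ' :: acc) (some ' ') (by simp at hl ⊢; omega)
            (Or.inl (by simp [pvMemo_some]; exact fun h => hc h.symm))]
          simp
        · have h2 : pvScan [c] [] p (ch :: t) = ch :: pvScan [c] [] (some ch) t := by
            simp only [pvScan]
            rw [if_neg (by simp [hsp])]
          have hinv' : pvMemo (some ch) [c] = false ∨ t.head? ≠ some ' ' := by
            by_cases hcc : ch = c
            · subst hcc
              right
              intro hh
              apply hpre
              cases t with
              | nil => simp at hh
              | cons y t' =>
                simp at hh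
                subst hh
                simp [List.isPrefixOf]
            · exact Or.inl (by simp [pvMemo_some, hcc])
          rw [h2, ih t (ch :: acc) (some ch) (by simp at hl ⊢; omega) hinv']
          simp

lemma replace_prev (c : Char) (hc : c ≠ ' ') (s : List Char) :
    PySem.Chars.replace s [c, ' '] [c] = pvScan [c] [] none s := by
  have h := replace_prev_go c hc s.length s [] none (le_refl _) (Or.inl (pvMemo_nil none))
  simpa [PySem.Chars.replace] using h

lemma pvScan_cons (P N : List Char) (p : Option Char) (ch : Char) (rest : List Char) :
    pvScan P N p (ch :: rest) = if ch = ' ' ∧ (pvMemo p P || pvMemo rest.head? N) = true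
      then pvScan P N (some ' ') rest else ch :: pvScan P N (some ch) rest := rfl

lemma pvScan_head_mem (P1 N1 N2 : List Char)
    (hdN : ∀ x ∈ N1, x ∉ N2) (hN1 : ' ' ∉ N1) (hN2 : ' ' ∉ N2)
    (rest : List Char) (p : Option Char) (hp : pvMemo p P1 = false) :
    pvMemo (pvScan P1 N1 p rest).head? N2 = pvMemo rest.head? N2 := by
  cases rest with
  | nil => rfl
  | cons ch t =>
    rw [pvScan_cons]
    by_cases hcond : ch = ' ' ∧ (pvMemo p P1 || pvMemo t.head? N1) = true
    · rw [if_pos hcond]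
      obtain ⟨rfl, hb⟩ := hcond
      rw [hp] at hb
      simp only [Bool.false_or] at hb
      cases t with
      | nil => simp [pvMemo] at hb
      | cons n t' =>
        have hn : n ∈ N1 := by simpa [pvMemo] using hb
        have hns : ¬ n = ' ' := fun h => hN1 (h ▸ hn)
        rw [pvScan_cons, if_neg (by simp [hns])]
        have h1 : pvMemo (some n) N2 = false := by
          simp [pvMemo]; exact hdN n hn
        have h2 : pvMemo (some ' ') N2 = false := by
          simp [pvMemo]; exact hN2
        simp [h1, h2]
    · rw [if_neg hcond]; rfl

lemma pvScan_comp (P1 N1 P2 N2 : List Char)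
    (hdP : ∀ x ∈ P1, x ∉ P2) (hdN : ∀ x ∈ N1, x ∉ N2)
    (hP1 : ' ' ∉ P1) (hP2 : ' ' ∉ P2) (hN1 : ' ' ∉ N1) (hN2 : ' ' ∉ N2) :
    ∀ (l : List Char) (p1 p2 : Option Char),
      (p2 = p1 ∨ (p1 = some ' ' ∧ (pvMemo p2 P1 = true ∨ l.head? ≠ some ' '))) →
      pvScan P2 N2 p2 (pvScan P1 N1 p1 l) = pvScan (P1 ++ P2) (N1 ++ N2) p1 l := by
  intro l
  induction l with
  | nil => intro p1 p2 _; rfl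
  | cons ch rest ih =>
    intro p1 p2 hR
    rw [pvScan_cons P1, pvScan_cons (P1 ++ P2)]
    by_cases hch : ch = ' '
    · subst hch
      by_cases h1 : (pvMemo p1 P1 || pvMemo rest.head? N1) = true
      · rw [if_pos ⟨rfl, h1⟩]
        have hU : (pvMemo p1 (P1 ++ P2) || pvMemo rest.head? (N1 ++ N2)) = true := by
          rw [pvMemo_append, pvMemo_append]
          rcases Bool.or_eq_true_iff.mp h1 with h | h
          · simp [h]
          · simp [h]
        rw [if_pos ⟨rfl, hU⟩]
        apply ih
        rcases Bool.or_eq_true_iff.mp h1 with h | h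
        · -- p1 is a P1 trigger, hence p1 ≠ some ' ', hence p2 = p1
          have hp2 : p2 = p1 := by
            rcases hR with h' | ⟨h', _⟩
            · exact h'
            · rw [h'] at h; simp [pvMemo] at h; exact absurd h hP1
          exact Or.inr ⟨rfl, Or.inl (hp2 ▸ h)⟩
        · -- the lookahead is an N1 trigger, hence not a space
          right
          refine ⟨rfl, Or.inr ?_⟩
          cases hh : rest.head? with
          | none => simp
          | some n =>
            rw [hh] at h
            have hn : n ∈ N1 := by simpa [pvMemo] using h
            have : ¬ n = ' ' := fun h' => hN1 (h' ▸ hn)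
            simp [this]
      · rw [if_neg (by simp [h1]), pvScan_cons P2]
        have hm1 : pvMemo p1 P1 = false := by
          rcases Bool.or_eq_false_iff.mp (Bool.eq_false_iff.mpr h1 ▸ rfl : (pvMemo p1 P1 || pvMemo rest.head? N1) = false) with ⟨a, b⟩
          exact a
        have hm2 : pvMemo rest.head? N1 = false := by
          rcases Bool.or_eq_false_iff.mp (Bool.eq_false_iff.mpr h1 ▸ rfl : (pvMemo p1 P1 || pvMemo rest.head? N1) = false) with ⟨a, b⟩
          exact b
        have hhd : pvMemo (pvScan P1 N1 (some ' ') rest).head? N2 = pvMemo rest.head? N2 :=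
          pvScan_head_mem P1 N1 N2 hdN hN1 hN2 rest (some ' ') (by simp [pvMemo]; exact hP1)
        have hpp : pvMemo p2 P2 = pvMemo p1 P2 := by
          rcases hR with h' | ⟨h', h''⟩
          · rw [h']
          · rcases h'' with h'' | h''
            · have : p1 = some ' ' := h'
              cases p2 with
              | none => simp [pvMemo] at h''
              | some y =>
                have hy : y ∈ P1 := by simpa [pvMemo] using h''
                have : pvMemo (some y) P2 = false := by simp [pvMemo]; exact hdP y hy
                rw [this, h']
                simp [pvMemo]; exact hP2
            · exact absurd rfl h''
        have hcondeq : (pvMemo p2 P2 || pvMemo (pvScan P1 N1 (some ' ') rest).head? N2)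
            = (pvMemo p1 (P1 ++ P2) || pvMemo rest.head? (N1 ++ N2)) := by
          rw [hhd, hpp, pvMemo_append, pvMemo_append, hm1, hm2]
          simp
        by_cases hc2 : (pvMemo p2 P2 || pvMemo (pvScan P1 N1 (some ' ') rest).head? N2) = true
        · rw [if_pos ⟨rfl, hc2⟩, if_pos ⟨rfl, hcondeq ▸ hc2⟩]
          exact ih (some ' ') (some ' ') (Or.inl rfl)
        · rw [if_neg (by simp [hc2]), if_neg (by rw [← hcondeq]; simp [hc2])]
          congr 1
          exact ih (some ' ') (some ' ') (Or.inl rfl)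
    · rw [if_neg (by simp [hch]), if_neg (by simp [hch]), pvScan_cons P2,
        if_neg (by simp [hch])]
      congr 1
      exact ih (some ch) (some ch) (Or.inl rfl)

lemma pvScan_comp0 (P1 N1 P2 N2 : List Char)
    (hdP : ∀ x ∈ P1, x ∉ P2) (hdN : ∀ x ∈ N1, x ∉ N2)
    (hP1 : ' ' ∉ P1) (hP2 : ' ' ∉ P2) (hN1 : ' ' ∉ N1) (hN2 : ' ' ∉ N2)
    (l : List Char) :
    pvScan P2 N2 none (pvScan P1 N1 none l) = pvScan (P1 ++ P2) (N1 ++ N2) none l :=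
  pvScan_comp P1 N1 P2 N2 hdP hdN hP1 hP2 hN1 hN2 l none none (Or.inl rfl)

set_option maxRecDepth 8192 in
lemma pv_chain (l : List Char) :
  pvScan ['\t'] [] none (pvScan [] ['\t'] none (pvScan ['\n'] [] none (pvScan [] ['\n'] none
   (pvScan ['{'] [] none (pvScan ['['] [] none (pvScan ['('] [] none
   (pvScan [] ['}'] none (pvScan [] [']'] none (pvScan [] [')'] none (pvScan [] [';'] none
   (pvScan [] [':'] none (pvScan [] ['!'] none (pvScan [] ['?'] none (pvScan [] [','] none
   (pvScan [] ['.'] none l))))))))))))))) =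
  pvScan ['(', '[', '{', '\n', '\t'] ['.', ',', '?', '!', ':', ';', ')', ']', '}', '\n', '\t'] none l := by
  have e1 : ∀ l : List Char, pvScan [] [','] none (pvScan [] ['.'] none l) = pvScan [] ['.', ','] none l := fun l => by
    simpa using pvScan_comp0 [] ['.'] [] [','] (by intro x hx; fin_cases hx <;> decide) (by intro x hx; fin_cases hx <;> decide) (by decide) (by decide) (by decide) (by decide) l
  have e2 : ∀ l : List Char, pvScan [] ['?'] none (pvScan [] ['.', ','] none l) = pvScan [] ['.', ',', '?'] none l := fun l => by
    simpa using pvScan_comp0 [] ['.', ','] [] ['?'] (by intro x hx; fin_cases hx <;> decide) (by intro x hx; fin_cases hx <;> decide) (by decide) (by decide) (by decide) (by decide) l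
  have e3 : ∀ l : List Char, pvScan [] ['!'] none (pvScan [] ['.', ',', '?'] none l) = pvScan [] ['.', ',', '?', '!'] none l := fun l => by
    simpa using pvScan_comp0 [] ['.', ',', '?'] [] ['!'] (by intro x hx; fin_cases hx <;> decide) (by intro x hx; fin_cases hx <;> decide) (by decide) (by decide) (by decide) (by decide) l
  have e4 : ∀ l : List Char, pvScan [] [':'] none (pvScan [] ['.', ',', '?', '!'] none l) = pvScan [] ['.', ',', '?', '!', ':'] none l := fun l => by
    simpa using pvScan_comp0 [] ['.', ',', '?', '!'] [] [':'] (by intro x hx; fin_cases hx <;> decide) (by intro x hx; fin_cases hx <;> decide) (by decide) (by decide) (by decide) (by decide) l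
  have e5 : ∀ l : List Char, pvScan [] [';'] none (pvScan [] ['.', ',', '?', '!', ':'] none l) = pvScan [] ['.', ',', '?', '!', ':', ';'] none l := fun l => by
    simpa using pvScan_comp0 [] ['.', ',', '?', '!', ':'] [] [';'] (by intro x hx; fin_cases hx <;> decide) (by intro x hx; fin_cases hx <;> decide) (by decide) (by decide) (by decide) (by decide) l
  have e6 : ∀ l : List Char, pvScan [] [')'] none (pvScan [] ['.', ',', '?', '!', ':', ';'] none l) = pvScan [] ['.', ',', '?', '!', ':', ';', ')'] none l := fun l => by
    simpa using pvScan_comp0 [] ['.', ',', '?', '!', ':', ';'] [] [')'] (by intro x hx; fin_cases hx <;> decide) (by intro x hx; fin_cases hx <;> decide) (by decide) (by decide) (by decide) (by decide) l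
  have e7 : ∀ l : List Char, pvScan [] [']'] none (pvScan [] ['.', ',', '?', '!', ':', ';', ')'] none l) = pvScan [] ['.', ',', '?', '!', ':', ';', ')', ']'] none l := fun l => by
    simpa using pvScan_comp0 [] ['.', ',', '?', '!', ':', ';', ')'] [] [']'] (by intro x hx; fin_cases hx <;> decide) (by intro x hx; fin_cases hx <;> decide) (by decide) (by decide) (by decide) (by decide) l
  have e8 : ∀ l : List Char, pvScan [] ['}'] none (pvScan [] ['.', ',', '?', '!', ':', ';', ')', ']'] none l) = pvScan [] ['.', ',', '?', '!', ':', ';', ')', ']', '}'] none l := fun l => by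
    simpa using pvScan_comp0 [] ['.', ',', '?', '!', ':', ';', ')', ']'] [] ['}'] (by intro x hx; fin_cases hx <;> decide) (by intro x hx; fin_cases hx <;> decide) (by decide) (by decide) (by decide) (by decide) l
  have e9 : ∀ l : List Char, pvScan ['('] [] none (pvScan [] ['.', ',', '?', '!', ':', ';', ')', ']', '}'] none l) = pvScan ['('] ['.', ',', '?', '!', ':', ';', ')', ']', '}'] none l := fun l => by
    simpa using pvScan_comp0 [] ['.', ',', '?', '!', ':', ';', ')', ']', '}'] ['('] [] (by intro x hx; fin_cases hx <;> decide) (by intro x hx; fin_cases hx <;> decide) (by decide) (by decide) (by decide) (by decide) l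
  have e10 : ∀ l : List Char, pvScan ['['] [] none (pvScan ['('] ['.', ',', '?', '!', ':', ';', ')', ']', '}'] none l) = pvScan ['(', '['] ['.', ',', '?', '!', ':', ';', ')', ']', '}'] none l := fun l => by
    simpa using pvScan_comp0 ['('] ['.', ',', '?', '!', ':', ';', ')', ']', '}'] ['['] [] (by intro x hx; fin_cases hx <;> decide) (by intro x hx; fin_cases hx <;> decide) (by decide) (by decide) (by decide) (by decide) l
  have e11 : ∀ l : List Char, pvScan ['{'] [] none (pvScan ['(', '['] ['.', ',', '?', '!', ':', ';', ')', ']', '}'] none l) = pvScan ['(', '[', '{'] ['.', ',', '?', '!', ':', ';', ')', ']', '}'] none l := fun l => by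
    simpa using pvScan_comp0 ['(', '['] ['.', ',', '?', '!', ':', ';', ')', ']', '}'] ['{'] [] (by intro x hx; fin_cases hx <;> decide) (by intro x hx; fin_cases hx <;> decide) (by decide) (by decide) (by decide) (by decide) l
  have e12 : ∀ l : List Char, pvScan [] ['\n'] none (pvScan ['(', '[', '{'] ['.', ',', '?', '!', ':', ';', ')', ']', '}'] none l) = pvScan ['(', '[', '{'] ['.', ',', '?', '!', ':', ';', ')', ']', '}', '\n'] none l := fun l => by
    simpa using pvScan_comp0 ['(', '[', '{'] ['.', ',', '?', '!', ':', ';', ')', ']', '}'] [] ['\n'] (by intro x hx; fin_cases hx <;> decide) (by intro x hx; fin_cases hx <;> decide) (by decide) (by decide) (by decide) (by decide) l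
  have e13 : ∀ l : List Char, pvScan ['\n'] [] none (pvScan ['(', '[', '{'] ['.', ',', '?', '!', ':', ';', ')', ']', '}', '\n'] none l) = pvScan ['(', '[', '{', '\n'] ['.', ',', '?', '!', ':', ';', ')', ']', '}', '\n'] none l := fun l => by
    simpa using pvScan_comp0 ['(', '[', '{'] ['.', ',', '?', '!', ':', ';', ')', ']', '}', '\n'] ['\n'] [] (by intro x hx; fin_cases hx <;> decide) (by intro x hx; fin_cases hx <;> decide) (by decide) (by decide) (by decide) (by decide) l
  have e14 : ∀ l : List Char, pvScan [] ['\t'] none (pvScan ['(', '[', '{', '\n'] ['.', ',', '?', '!', ':', ';', ')', ']', '}', '\n'] none l) = pvScan ['(', '[', '{', '\n'] ['.', ',', '?', '!', ':', ';', ')', ']', '}', '\n', '\t'] none l := fun l => by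
    simpa using pvScan_comp0 ['(', '[', '{', '\n'] ['.', ',', '?', '!', ':', ';', ')', ']', '}', '\n'] [] ['\t'] (by intro x hx; fin_cases hx <;> decide) (by intro x hx; fin_cases hx <;> decide) (by decide) (by decide) (by decide) (by decide) l
  have e15 : ∀ l : List Char, pvScan ['\t'] [] none (pvScan ['(', '[', '{', '\n'] ['.', ',', '?', '!', ':', ';', ')', ']', '}', '\n', '\t'] none l) = pvScan ['(', '[', '{', '\n', '\t'] ['.', ',', '?', '!', ':', ';', ')', ']', '}', '\n', '\t'] none l := fun l => by
    simpa using pvScan_comp0 ['(', '[', '{', '\n'] ['.', ',', '?', '!', ':', ';', ')', ']', '}', '\n', '\t'] ['\t'] [] (by intro x hx; fin_cases hx <;> decide) (by intro x hx; fin_cases hx <;> decide) (by decide) (by decide) (by decide) (by decide) l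
  rw [e1, e2, e3, e4, e5, e6, e7, e8, e9, e10, e11, e12, e13, e14, e15]

-- ===== VERDICT (by name: the statement is the Claim_ definition above) =====
theorem clean_punctuation_spacing_py_spec : Claim_equal_clean_punctuation_spacing_py := by
  intro text _
  unfold Spec_clean_punctuation_spacing_py
  unfold clean_punctuation_spacing_py clean_punctuation_spacing_py_alt
  simp only [List.foldl]
  simp only [PySem.Str.replace, String.toList_ofList]
  rw [replace_next '.' (by decide), replace_next ',' (by decide), replace_next '?' (by decide),
      replace_next '!' (by decide), replace_next ':' (by decide), replace_next ';' (by decide),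
      replace_next ')' (by decide), replace_next ']' (by decide), replace_next '}' (by decide),
      replace_prev '(' (by decide), replace_prev '[' (by decide), replace_prev '{' (by decide),
      replace_next '\n' (by decide), replace_prev '\n' (by decide),
      replace_next '\t' (by decide), replace_prev '\t' (by decide)]
  rw [pv_chain]
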